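-- pv_equiv track=rewrite | github.com/IvanPilat1/MLTA | Lab1_v2.py | edges_from_inc_matrix
-- ===== SOURCE A (Python) =====
-- def edges_from_inc_matrix(inc_matrix, vertices):
--
--     edges = []
--     n = len(vertices)      # кількість вершин
--     m = len(inc_matrix[0]) # кількість ребер (стовпців)
--
--     for k in range(m):  # ідемо по стовпцях (ребрах)
--         connected_vertices = []
--         for i in range(n):  # ідемо по вершинах
--             if inc_matrix[i][k] == 1:
--                 connected_vertices.append(vertices[i])
--         if len(connected_vertices) == 2:  # ребро з двох вершин
--             edges.append((connected_vertices[0], connected_vertices[1]))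
--     return edges
-- ===== SOURCE B (Python) =====
-- def edges_from_inc_matrix(inc_matrix, vertices):
--     m = len(inc_matrix[0])
--     n = len(vertices)
--     buckets = [[] for _ in range(m)]
--     for i in range(n):            # single row-major pass
--         row = inc_matrix[i]
--         v = vertices[i]
--         for k in range(m):
--             if row[k] == 1:
--                 buckets[k].append(v)
--     edges = []
--     for b in buckets:
--         if len(b) == 2:
--             edges.append((b[0], b[1]))
--     return edges
-- ===== Notes on version B (the rewrite author's own statement) =====
-- stated objective: alternative
-- what changed: Replaces A's column-major scan (one full pass over all rows per edge column) by a single row-major pass that appends each incident vertex into a per-edge bucket list, then emits the buckets of size 2.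
-- outside the precondition, e.g. on edges_from_inc_matrix([[]], [8, 3]): A returns [], B raises IndexError
import Mathlib
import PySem

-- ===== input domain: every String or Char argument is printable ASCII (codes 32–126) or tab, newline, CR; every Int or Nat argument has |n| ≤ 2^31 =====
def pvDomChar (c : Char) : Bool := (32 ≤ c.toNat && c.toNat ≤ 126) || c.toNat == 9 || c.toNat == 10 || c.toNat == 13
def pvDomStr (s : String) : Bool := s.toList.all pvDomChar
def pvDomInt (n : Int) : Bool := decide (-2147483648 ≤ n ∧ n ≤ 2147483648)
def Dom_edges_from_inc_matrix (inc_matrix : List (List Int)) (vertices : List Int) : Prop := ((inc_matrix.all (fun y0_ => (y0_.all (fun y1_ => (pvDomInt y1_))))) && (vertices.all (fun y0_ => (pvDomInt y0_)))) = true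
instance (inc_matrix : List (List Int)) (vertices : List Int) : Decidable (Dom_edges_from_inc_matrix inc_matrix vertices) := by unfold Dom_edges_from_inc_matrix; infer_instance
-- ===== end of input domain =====

-- B replaces A's column-major scan by one row-major pass into per-edge buckets; return values proved equal on Pre_.


-- ===== PORT A =====
-- column-major: for each column k, collect incident vertices, emit pairs of size-2 collections
def edges_from_inc_matrix (inc_matrix : List (List Int)) (vertices : List Int) : List (Int × Int) :=
  let n := vertices.length
  let m := (inc_matrix.headI).length
  (List.range m).foldl (fun edges k =>
    let cv := (List.range n).foldl (fun cv i =>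
      if (inc_matrix.getD i []).getD k 0 == 1 then cv ++ [vertices.getD i 0] else cv) []
    if cv.length == 2 then edges ++ [(cv.getD 0 0, cv.getD 1 0)] else edges) []

-- ===== PORT B =====
-- row-major single pass filling one bucket per edge, then emit size-2 buckets
def edges_from_inc_matrix_alt (inc_matrix : List (List Int)) (vertices : List Int) : List (Int × Int) :=
  let m := (inc_matrix.headI).length
  let n := vertices.length
  let buckets := (List.range n).foldl (fun bs i =>
      let row := inc_matrix.getD i []
      let v := vertices.getD i 0
      (List.range m).foldl (fun bs k =>
        if row.getD k 0 == 1 then bs.set k (bs.getD k [] ++ [v]) else bs) bs)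
    (List.replicate m [])
  buckets.foldl (fun edges b =>
    if b.length == 2 then edges ++ [(b.getD 0 0, b.getD 1 0)] else edges) []

-- ===== PRECONDITION & SPEC =====
-- Pre_ excludes exactly the inputs where Python A's indexing raises IndexError: an empty matrix,
-- or (when there is at least 1 column) a matrix with fewer rows than vertices or with a row (among
-- the first n) shorter than row 0.  B additionally raises on the zero-column case with more
-- vertices than rows (where A returns []), so that corner stays outside Pre_ too.
def Pre_edges_from_inc_matrix (inc_matrix : List (List Int)) (vertices : List Int) : Prop :=
  1 ≤ inc_matrix.length ∧ vertices.length ≤ inc_matrix.length ∧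
    ∀ row ∈ inc_matrix.take vertices.length, (inc_matrix.headI).length ≤ row.length
instance (inc_matrix : List (List Int)) (vertices : List Int) : Decidable (Pre_edges_from_inc_matrix inc_matrix vertices) := by unfold Pre_edges_from_inc_matrix; infer_instance

def pvWitness_edges_from_inc_matrix : List (List Int) × List Int :=
  ([[1, 1], [1, 0], [0, 1]], [10, 20, 30])

def Spec_edges_from_inc_matrix (inc_matrix : List (List Int)) (vertices : List Int) (out : List (Int × Int)) : Prop := out = edges_from_inc_matrix_alt inc_matrix vertices
instance (inc_matrix : List (List Int)) (vertices : List Int) (out : List (Int × Int)) : Decidable (Spec_edges_from_inc_matrix inc_matrix vertices out) := by unfold Spec_edges_from_inc_matrix; infer_instance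

-- ===== CLAIM (what is proved, stated in full; the proofs are below) =====
def Claim_equal_edges_from_inc_matrix : Prop := ∀ (inc_matrix : List (List Int)) (vertices : List Int), Dom_edges_from_inc_matrix inc_matrix vertices → Pre_edges_from_inc_matrix inc_matrix vertices → Spec_edges_from_inc_matrix inc_matrix vertices (edges_from_inc_matrix inc_matrix vertices)

-- ===== LEMMAS AND PROOFS =====

-- the vertices A collects for column k after scanning rows 0..i-1
def pvCol (inc : List (List Int)) (vs : List Int) (i k : Nat) : List Int :=
  (List.range i).foldl (fun cv i' =>
    if (inc.getD i' []).getD k 0 == 1 then cv ++ [vs.getD i' 0] else cv) []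

-- B's inner step for row i
def pvStep (inc : List (List Int)) (vs : List Int) (i : Nat)
    (bs : List (List Int)) (k : Nat) : List (List Int) :=
  if (inc.getD i []).getD k 0 == 1 then bs.set k (bs.getD k [] ++ [vs.getD i 0]) else bs

lemma pvStep_length (inc : List (List Int)) (vs : List Int) (i : Nat)
    (bs : List (List Int)) (k : Nat) : (pvStep inc vs i bs k).length = bs.length := by
  unfold pvStep; split <;> simp

lemma inner_length (inc : List (List Int)) (vs : List Int) (i : Nat) :
    ∀ (n s : Nat) (bs : List (List Int)),
      ((List.range' s n).foldl (pvStep inc vs i) bs).length = bs.length := by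
  intro n
  induction n with
  | zero => intro s bs; simp
  | succ n ih =>
    intro s bs
    rw [List.range'_succ, List.foldl_cons, ih]
    exact pvStep_length _ _ _ _ _

lemma inner_getD (inc : List (List Int)) (vs : List Int) (i : Nat) :
    ∀ (n s : Nat) (bs : List (List Int)) (j : Nat),
      ((List.range' s n).foldl (pvStep inc vs i) bs).getD j [] =
        if s ≤ j ∧ j < s + n ∧ j < bs.length ∧ ((inc.getD i []).getD j 0 == 1) = true
        then bs.getD j [] ++ [vs.getD i 0] else bs.getD j [] := by
  intro n
  induction n with
  | zero =>
    intro s bs j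
    rw [if_neg (by omega)]; simp
  | succ n ih =>
    intro s bs j
    rw [List.range'_succ, List.foldl_cons, ih]
    have hlen : (pvStep inc vs i bs s).length = bs.length := pvStep_length _ _ _ _ _
    have hgetD : ∀ j', (pvStep inc vs i bs s).getD j' [] =
        if j' = s ∧ s < bs.length ∧ ((inc.getD i []).getD s 0 == 1) = true
        then bs.getD s [] ++ [vs.getD i 0] else bs.getD j' [] := by
      intro j'
      unfold pvStep
      by_cases hc : ((inc.getD i []).getD s 0 == 1) = true
      · rw [if_pos hc]
        simp only [List.getD_eq_getElem?_getD, List.getElem?_set]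
        by_cases hj : s = j'
        · subst hj
          by_cases hs : s < bs.length
          · rw [if_pos rfl, if_pos hs, if_pos ⟨rfl, hs, hc⟩]; rfl
          · rw [if_pos rfl, if_neg hs, if_neg (by tauto)]
            simp [List.getElem?_eq_none (Nat.le_of_not_lt hs)]
        · rw [if_neg hj, if_neg (by tauto)]
      · rw [if_neg hc, if_neg (by tauto)]
    rw [hlen]
    by_cases hj : j = s
    · subst hj
      rw [if_neg (by omega), hgetD j]
      by_cases hc : j < bs.length ∧ ((inc.getD i []).getD j 0 == 1) = true
      · rw [if_pos ⟨rfl, hc.1, hc.2⟩, if_pos ⟨le_refl _, by omega, hc.1, hc.2⟩]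
      · rw [if_neg (fun h => hc ⟨h.2.1, h.2.2⟩), if_neg (fun h => hc ⟨h.2.2.1, h.2.2.2⟩)]
    · have hbs : (pvStep inc vs i bs s).getD j [] = bs.getD j [] := by
        rw [hgetD j]; exact if_neg (fun h => hj h.1)
      rw [hbs]
      by_cases h1 : s + 1 ≤ j ∧ j < s + 1 + n ∧ j < bs.length ∧
          ((inc.getD i []).getD j 0 == 1) = true
      · rw [if_pos h1, if_pos ⟨by omega, by omega, h1.2.2.1, h1.2.2.2⟩]
      · rw [if_neg h1, if_neg (fun h2 => h1 ⟨by omega, by omega, h2.2.2.1, h2.2.2.2⟩)]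

lemma inner_length_range (inc : List (List Int)) (vs : List Int) (i m : Nat)
    (bs : List (List Int)) :
    ((List.range m).foldl (pvStep inc vs i) bs).length = bs.length := by
  rw [List.range_eq_range']; exact inner_length inc vs i m 0 bs

lemma inner_getD_range (inc : List (List Int)) (vs : List Int) (i m : Nat)
    (bs : List (List Int)) (j : Nat) :
    ((List.range m).foldl (pvStep inc vs i) bs).getD j [] =
      if j < m ∧ j < bs.length ∧ ((inc.getD i []).getD j 0 == 1) = true
      then bs.getD j [] ++ [vs.getD i 0] else bs.getD j [] := by
  rw [List.range_eq_range', inner_getD]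
  simp only [Nat.zero_le, true_and, Nat.zero_add]

-- the buckets after scanning rows 0..i-1
def pvBuckets (inc : List (List Int)) (vs : List Int) (m i : Nat) : List (List Int) :=
  (List.range i).foldl (fun bs i' =>
    (List.range m).foldl (pvStep inc vs i') bs) (List.replicate m [])

lemma pvBuckets_length (inc : List (List Int)) (vs : List Int) (m : Nat) :
    ∀ i, (pvBuckets inc vs m i).length = m := by
  intro i
  induction i with
  | zero => simp [pvBuckets]
  | succ i ih =>
    unfold pvBuckets at *
    rw [List.range_succ, List.foldl_append, List.foldl_cons, List.foldl_nil,
      inner_length_range, ih]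

lemma pvBuckets_getD (inc : List (List Int)) (vs : List Int) (m : Nat) :
    ∀ i k, (pvBuckets inc vs m i).getD k [] =
      if k < m then pvCol inc vs i k else [] := by
  intro i
  induction i with
  | zero =>
    intro k
    simp [pvBuckets, pvCol, List.getD_eq_getElem?_getD, List.getElem?_replicate]
    split <;> simp
  | succ i ih =>
    intro k
    have hstep : pvBuckets inc vs m (i + 1) =
        (List.range m).foldl (pvStep inc vs i) (pvBuckets inc vs m i) := by
      unfold pvBuckets
      rw [List.range_succ, List.foldl_append, List.foldl_cons, List.foldl_nil]
    rw [hstep, inner_getD_range, pvBuckets_length, ih]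
    have hcol : pvCol inc vs (i + 1) k =
        if ((inc.getD i []).getD k 0 == 1) = true
        then pvCol inc vs i k ++ [vs.getD i 0] else pvCol inc vs i k := by
      unfold pvCol
      rw [List.range_succ, List.foldl_append, List.foldl_cons, List.foldl_nil]
    rw [hcol]
    by_cases hk : k < m
    · by_cases hc : ((inc.getD i []).getD k 0 == 1) = true
      · rw [if_pos ⟨hk, hk, hc⟩, if_pos hk, if_pos hk, if_pos hc]
      · rw [if_neg (by tauto), if_pos hk, if_pos hk, if_neg hc]
    · rw [if_neg (by tauto), if_neg hk, if_neg hk]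

lemma pvBuckets_eq_map (inc : List (List Int)) (vs : List Int) (m i : Nat) :
    pvBuckets inc vs m i = (List.range m).map (fun k => pvCol inc vs i k) := by
  apply List.ext_getElem?
  intro k
  by_cases hk : k < m
  · rw [List.getElem?_eq_getElem (by simpa [pvBuckets_length]),
      List.getElem?_eq_getElem (by simpa)]
    have h1 : (pvBuckets inc vs m i)[k]'(by simpa [pvBuckets_length]) =
        (pvBuckets inc vs m i).getD k [] := by
      rw [List.getD_eq_getElem?_getD, List.getElem?_eq_getElem (by simpa [pvBuckets_length])]
      rfl
    rw [h1, pvBuckets_getD, if_pos hk]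
    simp
  · rw [List.getElem?_eq_none (by simpa [pvBuckets_length] using Nat.le_of_not_lt hk),
      List.getElem?_eq_none (by simpa using Nat.le_of_not_lt hk)]

-- ===== VERDICT (by name: the statement is the Claim_ definition above) =====
theorem edges_from_inc_matrix_spec : Claim_equal_edges_from_inc_matrix := by
  intro inc vs _ _
  unfold Spec_edges_from_inc_matrix edges_from_inc_matrix edges_from_inc_matrix_alt
  simp only []
  rw [show ((List.range vs.length).foldl (fun bs i =>
        (List.range (inc.headI).length).foldl
          (fun bs k => if (inc.getD i []).getD k 0 == 1
            then bs.set k (bs.getD k [] ++ [vs.getD i 0]) else bs) bs)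
      (List.replicate (inc.headI).length [])) =
      pvBuckets inc vs (inc.headI).length vs.length from rfl,
    pvBuckets_eq_map, List.foldl_map]
  rfl
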